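-- pv_equiv track=rewrite | github.com/HuimengZhang/Stack_LSTM_Ner_Pytorch | model/evaluate.py | to_cws_pos
-- ===== SOURCE A (Python) =====
-- def to_cws_pos(real_action, predict_action, idx2action):
--     flags = [False, False]
--     wss = [[],[]]
--     poss = [[],[]]
--     actions = [real_action, predict_action]
--     for idx in range(len(actions)):
--         ws_start_pos = -1
--         pos = None
--         for ac_idx in range(len(actions[idx])):
--             if idx2action[actions[idx][ac_idx]].startswith('S'):
--                 if ws_start_pos >= 0 and pos is not None:
--                     wss[idx].append(str(ws_start_pos)+"-"+str(ac_idx-1))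
--                     poss[idx].append(str(ws_start_pos)+"-"+str(ac_idx-1)+"-"+pos)
--                 pos = idx2action[actions[idx][ac_idx]].split("#")[1]
--                 ws_start_pos = ac_idx
--             elif idx2action[actions[idx][ac_idx]].startswith('-pad') and pos is not None:
--                 wss[idx].append(str(ws_start_pos) + "-" + str(ac_idx - 1))
--                 poss[idx].append(str(ws_start_pos) + "-" + str(ac_idx - 1) + "-" + pos)
--                 ws_start_pos = -1
--                 pos = None
--         if ws_start_pos >= 0 and pos is not None:
--             wss[idx].append(str(ws_start_pos)+"-"+str(ac_idx))
--             poss[idx].append(str(ws_start_pos) + "-" + str(ac_idx) + "-" + pos)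
--
--     correct_ws = set(wss[0]) & set(wss[1])
--     correct_pos = set(poss[0]) & set(poss[1])
--     return len(wss[0]), len(wss[1]), len(correct_ws), len(correct_pos)
-- ===== SOURCE B (Python) =====
-- def to_cws_pos(real_action, predict_action, idx2action):
--     def spans(actions):
--         # phase 1: record events — starts (index, pos) and pad closers (index, None)
--         events = []
--         for i, a in enumerate(actions):
--             name = idx2action[a]
--             if name.startswith('S'):
--                 events.append((i, name.split('#')[1]))
--             elif name.startswith('-pad'):
--                 events.append((i, None))
--         # phase 2: close each start at the next event's index - 1, or at the last token
--         out = []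
--         for k, (i, p) in enumerate(events):
--             if p is None:
--                 continue
--             end = events[k + 1][0] - 1 if k + 1 < len(events) else len(actions) - 1
--             out.append((i, end, p))
--         return out
--     sp = [spans(real_action), spans(predict_action)]
--     wss = [[str(s) + "-" + str(e) for s, e, _ in sp[j]] for j in range(2)]
--     poss = [[str(s) + "-" + str(e) + "-" + p for s, e, p in sp[j]] for j in range(2)]
--     return len(wss[0]), len(wss[1]), len(set(wss[0]) & set(wss[1])), len(set(poss[0]) & set(poss[1]))
-- ===== Notes on version B (the rewrite author's own statement) =====
-- stated objective: alternative
-- what changed: B replaces A's stateful single pass (carrying ws_start_pos/pos and emitting strings on the fly) with a two-phase scan per sequence: first record start/pad events, then close each recorded start at the next event's index - 1 (or at the last token), building (start, end, pos) spans before formatting.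
import Mathlib
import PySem

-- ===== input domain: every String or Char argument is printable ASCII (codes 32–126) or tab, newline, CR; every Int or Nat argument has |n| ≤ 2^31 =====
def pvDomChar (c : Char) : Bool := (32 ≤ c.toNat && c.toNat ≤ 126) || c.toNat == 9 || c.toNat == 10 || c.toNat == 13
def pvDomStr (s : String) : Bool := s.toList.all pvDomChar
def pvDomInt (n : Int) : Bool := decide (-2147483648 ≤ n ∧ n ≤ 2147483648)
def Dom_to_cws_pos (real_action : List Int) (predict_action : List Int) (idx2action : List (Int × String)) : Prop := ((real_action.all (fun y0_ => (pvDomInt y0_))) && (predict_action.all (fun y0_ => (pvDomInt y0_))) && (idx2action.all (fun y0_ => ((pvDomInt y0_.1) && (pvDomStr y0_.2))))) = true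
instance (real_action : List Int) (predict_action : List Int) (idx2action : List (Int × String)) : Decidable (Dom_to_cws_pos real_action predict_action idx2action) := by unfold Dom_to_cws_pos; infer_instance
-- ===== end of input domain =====

-- B re-derives the spans by a two-phase event scan (record start/pad events, then close each
-- start by looking at the next event) instead of A's stateful single pass; objective: alternative.

-- ===== shared pure helpers (identical sub-expressions of both Pythons) =====

-- idx2action[a] : Python dict lookup; KeyError (excluded by Pre_) gives the "" default here
def lookupA (d : List (Int × String)) (a : Int) : String :=
  ((PySem.Dict.mk d).get? a).getD ""

-- name.split('#')[1] : IndexError when '#' is absent (excluded by Pre_) gives the "" default here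
def posOf (nm : String) : String :=
  (PySem.List.pyGet? ((PySem.Str.split? nm "#").getD []) 1).getD ""

-- str(s) + "-" + str(e)
def strWS (s e : Int) : String := PySem.Int.toStr s ++ "-" ++ PySem.Int.toStr e
-- str(s) + "-" + str(e) + "-" + p
def strPOS (s e : Int) (p : String) : String := strWS s e ++ "-" ++ p

-- ===== PORT A =====
-- loop state: (ws_start_pos, pos, wss[idx], poss[idx])
abbrev StA := Int × Option String × List String × List String

-- the body of A's inner loop, on the token's name
def stepCore (s : StA) (ac_idx : Int) (nm : String) : StA :=
  if PySem.Str.startswith nm "S" then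
    let s1 := if s.1 ≥ 0 ∧ s.2.1 ≠ none then
        (s.1, s.2.1, s.2.2.1 ++ [strWS s.1 (ac_idx - 1)],
         s.2.2.2 ++ [strPOS s.1 (ac_idx - 1) (s.2.1.getD "")])
      else s
    (ac_idx, some (posOf nm), s1.2.2.1, s1.2.2.2)
  else if PySem.Str.startswith nm "-pad" = true ∧ s.2.1 ≠ none then
    (-1, none, s.2.2.1 ++ [strWS s.1 (ac_idx - 1)],
     s.2.2.2 ++ [strPOS s.1 (ac_idx - 1) (s.2.1.getD "")])
  else s

def stepA (d : List (Int × String)) (acts : List Int) (s : StA) (ac_idx : Int) : StA :=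
  stepCore s ac_idx (lookupA d (PySem.List.pyGetD acts ac_idx 0))

-- the trailing 'if ws_start_pos >= 0 and pos is not None' after the loop; when the guard holds
-- the loop ran, so the leftover ac_idx is n - 1
def finishA (n : Int) (st : StA) : List String × List String :=
  if st.1 ≥ 0 ∧ st.2.1 ≠ none then
    (st.2.2.1 ++ [strWS st.1 (n - 1)], st.2.2.2 ++ [strPOS st.1 (n - 1) (st.2.1.getD "")])
  else (st.2.2.1, st.2.2.2)

-- the body of A's outer loop over actions = [real_action, predict_action]
def seqA (d : List (Int × String)) (acts : List Int) : List String × List String :=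
  finishA (acts.length : Int)
    ((PySem.List.pyRange 0 (acts.length : Int) 1).foldl (stepA d acts) (-1, none, [], []))

def to_cws_pos (real_action : List Int) (predict_action : List Int) (idx2action : List (Int × String)) : Int × Int × Int × Int :=
  (((seqA idx2action real_action).1.length : Int),
   ((seqA idx2action predict_action).1.length : Int),
   PySem.Set.len (PySem.Set.inter (PySem.Set.ofList (seqA idx2action real_action).1) (seqA idx2action predict_action).1),
   PySem.Set.len (PySem.Set.inter (PySem.Set.ofList (seqA idx2action real_action).2) (seqA idx2action predict_action).2))

-- ===== PORT B =====
-- phase 1 of Source B: the recorded event of one enumerated token, if any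
def evOf (d : List (Int × String)) (p : Int × Int) : Option (Int × Option String) :=
  let nm := lookupA d p.2
  if PySem.Str.startswith nm "S" then some (p.1, some (posOf nm))
  else if PySem.Str.startswith nm "-pad" then some (p.1, none)
  else none

def eventsB (d : List (Int × String)) (acts : List Int) : List (Int × Option String) :=
  (PySem.List.enumerate acts).filterMap (evOf d)

-- phase 2 of Source B: close each start at the next event's index - 1, or at n - 1 for the last
def spansB (n : Int) : List (Int × Option String) → List (Int × Int × String)
  | [] => []
  | (i, p) :: rest =>
      let e := match rest with
        | [] => n - 1
        | (j, _) :: _ => j - 1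
      match p with
      | some q => (i, e, q) :: spansB n rest
      | none => spansB n rest

def seqB (d : List (Int × String)) (acts : List Int) : List (Int × Int × String) :=
  spansB (acts.length : Int) (eventsB d acts)

def to_cws_pos_alt (real_action : List Int) (predict_action : List Int) (idx2action : List (Int × String)) : Int × Int × Int × Int :=
  let ws0 := (seqB idx2action real_action).map (fun t => strWS t.1 t.2.1)
  let ws1 := (seqB idx2action predict_action).map (fun t => strWS t.1 t.2.1)
  let ps0 := (seqB idx2action real_action).map (fun t => strPOS t.1 t.2.1 t.2.2)
  let ps1 := (seqB idx2action predict_action).map (fun t => strPOS t.1 t.2.1 t.2.2)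
  ((ws0.length : Int), (ws1.length : Int),
   PySem.Set.len (PySem.Set.inter (PySem.Set.ofList ws0) ws1),
   PySem.Set.len (PySem.Set.inter (PySem.Set.ofList ps0) ps1))

-- ===== PRECONDITION & SPEC =====
-- Pre_ excludes exactly the inputs where A raises: an action id missing from idx2action
-- (KeyError) or a name that starts with 'S' but contains no '#' (IndexError on split('#')[1]).
def Pre_to_cws_pos (real_action : List Int) (predict_action : List Int) (idx2action : List (Int × String)) : Prop :=
  ∀ a ∈ real_action ++ predict_action,
    ((PySem.Dict.mk idx2action).get? a).isSome = true ∧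
    (PySem.Str.startswith (lookupA idx2action a) "S" = true →
      2 ≤ ((PySem.Str.split? (lookupA idx2action a) "#").getD []).length)
instance (real_action : List Int) (predict_action : List Int) (idx2action : List (Int × String)) : Decidable (Pre_to_cws_pos real_action predict_action idx2action) := by unfold Pre_to_cws_pos; infer_instance

def pvWitness_to_cws_pos : List Int × List Int × (List (Int × String)) :=
  ([0, 1, 2], [0, 2], [(0, "S#NN"), (1, "-pad"), (2, "S#VV")])

def Spec_to_cws_pos (real_action : List Int) (predict_action : List Int) (idx2action : List (Int × String)) (out : Int × Int × Int × Int) : Prop := out = to_cws_pos_alt real_action predict_action idx2action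
instance (real_action : List Int) (predict_action : List Int) (idx2action : List (Int × String)) (out : Int × Int × Int × Int) : Decidable (Spec_to_cws_pos real_action predict_action idx2action out) := by unfold Spec_to_cws_pos; infer_instance

-- ===== CLAIM (what is proved, stated in full; the proofs are below) =====
def Claim_equal_to_cws_pos : Prop := ∀ (real_action : List Int) (predict_action : List Int) (idx2action : List (Int × String)), Dom_to_cws_pos real_action predict_action idx2action → Pre_to_cws_pos real_action predict_action idx2action → Spec_to_cws_pos real_action predict_action idx2action (to_cws_pos real_action predict_action idx2action)

-- ===== LEMMAS AND PROOFS =====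

-- A's step, re-expressed on an event (proof-side only)
def stepEv (s : StA) (e : Int × Option String) : StA :=
  match e.2 with
  | some q =>
      let s1 := if s.1 ≥ 0 ∧ s.2.1 ≠ none then
          (s.1, s.2.1, s.2.2.1 ++ [strWS s.1 (e.1 - 1)],
           s.2.2.2 ++ [strPOS s.1 (e.1 - 1) (s.2.1.getD "")])
        else s
      (e.1, some q, s1.2.2.1, s1.2.2.2)
  | none =>
      if s.2.1 ≠ none then
        (-1, none, s.2.2.1 ++ [strWS s.1 (e.1 - 1)],
         s.2.2.2 ++ [strPOS s.1 (e.1 - 1) (s.2.1.getD "")])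
      else s

-- the still-open segment of A, closed where B would close it
def pendOf (start : Int) (pos : Option String) (n : Int) (ev : List (Int × Option String)) : List (Int × Int × String) :=
  match pos with
  | none => []
  | some q => [(start, (match ev with | [] => n - 1 | (j, _) :: _ => j - 1), q)]

lemma fold_core_eq_fold_ev (d : List (Int × String)) :
    ∀ (l : List (Int × Int)) (s : StA),
      l.foldl (fun s p => stepCore s p.1 (lookupA d p.2)) s
        = (l.filterMap (evOf d)).foldl stepEv s := by
  intro l
  induction l with
  | nil => intro s; rfl
  | cons p t ih =>
      intro s
      cases h1 : PySem.Str.startswith (lookupA d p.2) "S" with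
      | false =>
          cases h2 : PySem.Str.startswith (lookupA d p.2) "-pad" with
          | false =>
              have he : evOf d p = none := by
                simp only [evOf, h1, h2, Bool.false_eq_true, if_false]
              have hs : stepCore s p.1 (lookupA d p.2) = s := by
                simp only [stepCore, h1, h2, Bool.false_eq_true, if_false, false_and]
              simp only [List.foldl_cons, List.filterMap_cons, he, hs]
              exact ih _
          | true =>
              have he : evOf d p = some (p.1, none) := by
                simp only [evOf, h1, h2, Bool.false_eq_true, if_false, if_true]
              have hs : stepCore s p.1 (lookupA d p.2) = stepEv s (p.1, none) := by
                simp only [stepCore, stepEv, h1, h2, Bool.false_eq_true, if_false, true_and]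
              simp only [List.foldl_cons, List.filterMap_cons, he, hs]
              exact ih _
      | true =>
          have he : evOf d p = some (p.1, some (posOf (lookupA d p.2))) := by
            simp only [evOf, h1, if_true]
          have hs : stepCore s p.1 (lookupA d p.2)
              = stepEv s (p.1, some (posOf (lookupA d p.2))) := by
            simp only [stepCore, stepEv, h1, if_true]
          simp only [List.foldl_cons, List.filterMap_cons, he, hs]
          exact ih _

lemma main_lemma (n : Int) :
    ∀ (ev : List (Int × Option String)) (start : Int) (pos : Option String) (ws ps : List String),
      (pos ≠ none → 0 ≤ start) → (∀ p ∈ ev, 0 ≤ p.1) →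
      finishA n (ev.foldl stepEv (start, pos, ws, ps))
        = (ws ++ (pendOf start pos n ev ++ spansB n ev).map (fun t => strWS t.1 t.2.1),
           ps ++ (pendOf start pos n ev ++ spansB n ev).map (fun t => strPOS t.1 t.2.1 t.2.2)) := by
  intro ev
  induction ev with
  | nil =>
      intro start pos ws ps hinv _
      cases pos with
      | none => simp [finishA, pendOf, spansB]
      | some q =>
          have h0 : (0:Int) ≤ start := hinv (by simp)
          simp only [List.foldl_nil, finishA, pendOf, spansB]
          rw [if_pos ⟨h0, by simp⟩]
          simp
  | cons e rest ih =>
      intro start pos ws ps hinv hidx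
      obtain ⟨j, ep⟩ := e
      have hj : (0:Int) ≤ j := hidx (j, ep) (by simp)
      have hrest : ∀ p ∈ rest, (0:Int) ≤ p.1 := fun p hp => hidx p (by simp [hp])
      cases ep with
      | some q' =>
          cases pos with
          | none =>
              simp only [List.foldl_cons, stepEv]
              rw [if_neg (by simp)]
              rw [ih j (some q') ws ps (fun _ => hj) hrest]
              simp [pendOf, spansB]
          | some q =>
              have h0 : (0:Int) ≤ start := hinv (by simp)
              simp only [List.foldl_cons, stepEv]
              rw [if_pos ⟨h0, by simp⟩]
              rw [ih j (some q') _ _ (fun _ => hj) hrest]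
              simp [pendOf, spansB]
      | none =>
          cases pos with
          | none =>
              simp only [List.foldl_cons, stepEv]
              rw [if_neg (by simp)]
              rw [ih start none ws ps (by simp) hrest]
              simp [pendOf, spansB]
          | some q =>
              simp only [List.foldl_cons, stepEv]
              rw [if_pos (by simp)]
              rw [ih (-1) none _ _ (by simp) hrest]
              simp [pendOf, spansB]

lemma idx_nonneg (d : List (Int × String)) (acts : List Int) :
    ∀ p ∈ eventsB d acts, (0:Int) ≤ p.1 := by
  intro p hp
  simp only [eventsB, List.mem_filterMap] at hp
  obtain ⟨q, hq, hev⟩ := hp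
  rw [PySem.List.mem_enumerate_iff] at hq
  obtain ⟨k, hk, rfl⟩ := hq
  simp only [evOf] at hev
  split_ifs at hev <;> (injection hev with h; subst h; simp)

lemma seq_eq (d : List (Int × String)) (acts : List Int) :
    seqA d acts = ((seqB d acts).map (fun t => strWS t.1 t.2.1),
                   (seqB d acts).map (fun t => strPOS t.1 t.2.1 t.2.2)) := by
  have h0 : (PySem.List.pyRange 0 (acts.length : Int) 1).foldl (stepA d acts) (-1, none, [], [])
      = (PySem.List.enumerate acts).foldl (fun s p => stepCore s p.1 (lookupA d p.2)) (-1, none, [], []) := by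
    rw [PySem.List.enumerate_eq_map_pyRange acts 0, List.foldl_map]
    rfl
  have hm := main_lemma (acts.length : Int) (eventsB d acts) (-1) none [] []
    (by simp) (idx_nonneg d acts)
  unfold eventsB at hm
  unfold seqA seqB eventsB
  rw [h0, fold_core_eq_fold_ev d, hm]
  simp [pendOf]

-- ===== VERDICT (by name: the statement is the Claim_ definition above) =====
theorem to_cws_pos_spec : Claim_equal_to_cws_pos := by
  intro ra pa d _ _
  unfold Spec_to_cws_pos to_cws_pos to_cws_pos_alt
  rw [seq_eq d ra, seq_eq d pa]
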